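-- pv_equiv track=rewrite | github.com/K2/a-finite-monkey-engine | finite_monkey/agents/documentor.py | _extract_findings_from_text
-- ===== SOURCE A (Python) =====
-- from typing import Dict, List, Optional, Any, Tuple, Union
--
-- def _extract_findings_from_text(text: str) -> List[Dict[str, Any]]:
--     """
--     Extract findings from text
--
--     Args:
--         text: Findings section text
--
--     Returns:
--         List of findings
--     """
--     findings = []
--     current_finding = None
--
--     # Parse by line
--     lines = text.split("\n")
--     for line in lines:
--         line = line.strip()
--
--         # Check for finding headers
--         if line.startswith("###") or line.startswith("####"):
--             # Save previous finding
--             if current_finding: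
--                 findings.append(current_finding)
--
--             # Start new finding
--             title_parts = line.strip("#").strip()
--
--             # Extract severity if present
--             severity = "Medium"
--             if "Critical" in title_parts:
--                 severity = "Critical"
--             elif "High" in title_parts:
--                 severity = "High"
--             elif "Medium" in title_parts:
--                 severity = "Medium"
--             elif "Low" in title_parts:
--                 severity = "Low"
--             elif "Informational" in title_parts:
--                 severity = "Informational"
--
--             # Clean up title
--             title = title_parts
--             for sev in ["Critical", "High", "Medium", "Low", "Informational"]:
--                 title = title.replace(f"({sev})", "").replace(f"[{sev}]", "")
--
--             title = title.strip()
--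
--             current_finding = {
--                 "title": title,
--                 "description": "",
--                 "severity": severity,
--                 "location": "",
--             }
--         elif current_finding:
--             # Check for description
--             if "description:" in line.lower():
--                 desc_parts = line.split(":", 1)
--                 if len(desc_parts) > 1:
--                     current_finding["description"] = desc_parts[1].strip()
--             # Check for location
--             elif "location:" in line.lower():
--                 loc_parts = line.split(":", 1)
--                 if len(loc_parts) > 1:
--                     current_finding["location"] = loc_parts[1].strip()
--             # Check for severity
--             elif "severity:" in line.lower():
--                 sev_parts = line.split(":", 1)
--                 if len(sev_parts) > 1:
--                     severity = sev_parts[1].strip()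
--                     if severity in ["Critical", "High", "Medium", "Low", "Informational"]:
--                         current_finding["severity"] = severity
--             # Add to description if not empty
--             elif line and "description" in current_finding:
--                 if current_finding["description"]:
--                     current_finding["description"] += " " + line
--                 else:
--                     current_finding["description"] = line
--
--     # Add last finding
--     if current_finding:
--         findings.append(current_finding)
--
--     return findings
-- ===== SOURCE B (Python) =====
-- def _parse_group(header, body):
--     title_parts = header.strip("#").strip()
--     severity = "Medium"
--     for s in ("Critical", "High", "Medium", "Low", "Informational"):
--         if s in title_parts:
--             severity = s
--             break
--     title = title_parts
--     for s in ("Critical", "High", "Medium", "Low", "Informational"):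
--         title = title.replace(f"({s})", "").replace(f"[{s}]", "")
--     title = title.strip()
--     description = ""
--     location = ""
--     for line in body:
--         low = line.lower()
--         if "description:" in low:
--             parts = line.split(":", 1)
--             if len(parts) > 1:
--                 description = parts[1].strip()
--         elif "location:" in low:
--             parts = line.split(":", 1)
--             if len(parts) > 1:
--                 location = parts[1].strip()
--         elif "severity:" in low:
--             parts = line.split(":", 1)
--             if len(parts) > 1:
--                 sev = parts[1].strip()
--                 if sev in ("Critical", "High", "Medium", "Low", "Informational"):
--                     severity = sev
--         elif line:
--             description = description + " " + line if description else line
--     return {"title": title, "description": description, "severity": severity, "location": location}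
--
--
-- def _extract_findings_from_text(text):
--     lines = [ln.strip() for ln in text.split("\n")]
--     # first pass: group the lines, one group per '###' header; lines before the first header are dropped
--     groups = []
--     for ln in lines:
--         if ln.startswith("###"):
--             groups.append((ln, []))
--         elif groups:
--             groups[-1][1].append(ln)
--     # second pass: parse each group into a finding
--     return [_parse_group(h, body) for h, body in groups]
-- ===== Notes on version B (the rewrite author's own statement) =====
-- stated objective: alternative
-- what changed: B replaces A's single pass over lines with a mutable optional dict by two passes: first group the lines into (header, body-lines) groups at markdown header lines, then parse each group independently into a finding built from plain accumulator variables, assembling the dict once at the end.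
import Mathlib
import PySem

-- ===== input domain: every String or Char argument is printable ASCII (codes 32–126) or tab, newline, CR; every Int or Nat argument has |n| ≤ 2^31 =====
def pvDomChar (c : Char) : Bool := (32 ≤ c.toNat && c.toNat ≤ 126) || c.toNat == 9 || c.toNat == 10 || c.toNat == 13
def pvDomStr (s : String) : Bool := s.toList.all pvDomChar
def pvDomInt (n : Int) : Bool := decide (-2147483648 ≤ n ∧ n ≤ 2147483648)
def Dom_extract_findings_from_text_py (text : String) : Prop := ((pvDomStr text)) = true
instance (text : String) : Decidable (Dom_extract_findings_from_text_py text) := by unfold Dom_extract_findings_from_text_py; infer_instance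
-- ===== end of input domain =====

-- B re-implements the parse as two passes — group the lines at markdown header lines, then parse each
-- group with plain accumulator variables — instead of A's single fold over an optional mutable dict.

-- ===== PORT A =====
def pvSevListA : List String := ["Critical", "High", "Medium", "Low", "Informational"]

-- the dict created at a '###' header line (A's `current_finding = {...}`)
def pvHeaderDictA (line : String) : PySem.Dict String String :=
  let title_parts := PySem.Str.strip (PySem.Str.stripChars line "#")
  let severity :=
    if PySem.Str.isIn "Critical" title_parts then "Critical"
    else if PySem.Str.isIn "High" title_parts then "High"
    else if PySem.Str.isIn "Medium" title_parts then "Medium"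
    else if PySem.Str.isIn "Low" title_parts then "Low"
    else if PySem.Str.isIn "Informational" title_parts then "Informational"
    else "Medium"
  let title := pvSevListA.foldl
    (fun t sev => PySem.Str.replace (PySem.Str.replace t ("(" ++ sev ++ ")") "") ("[" ++ sev ++ "]") "") title_parts
  let title := PySem.Str.strip title
  PySem.Dict.ofList [("title", title), ("description", ""), ("severity", severity), ("location", "")]

-- A's elif-chain on a body line, mutating current_finding
def pvBodyStepA (d : PySem.Dict String String) (line : String) : PySem.Dict String String :=
  let low := PySem.Str.lower line
  if PySem.Str.isIn "description:" low then
    let parts := (PySem.Str.splitMax? line ":" 1).getD []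
    if parts.length > 1 then d.insert "description" (PySem.Str.strip (parts.getD 1 "")) else d
  else if PySem.Str.isIn "location:" low then
    let parts := (PySem.Str.splitMax? line ":" 1).getD []
    if parts.length > 1 then d.insert "location" (PySem.Str.strip (parts.getD 1 "")) else d
  else if PySem.Str.isIn "severity:" low then
    let parts := (PySem.Str.splitMax? line ":" 1).getD []
    if parts.length > 1 then
      let severity := PySem.Str.strip (parts.getD 1 "")
      if pvSevListA.contains severity then d.insert "severity" severity else d
    else d
  else if line ≠ "" && d.contains "description" then
    if d.getD "description" "" ≠ "" then
      d.insert "description" (d.getD "description" "" ++ " " ++ line)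
    else d.insert "description" line
  else d

def pvStepA (st : List (PySem.Dict String String) × Option (PySem.Dict String String)) (rawline : String) :
    List (PySem.Dict String String) × Option (PySem.Dict String String) :=
  let line := PySem.Str.strip rawline
  if PySem.Str.startswith line "###" || PySem.Str.startswith line "####" then
    ((match st.2 with | none => st.1 | some d => st.1 ++ [d]), some (pvHeaderDictA line))
  else
    match st.2 with
    | none => st
    | some d => (st.1, some (pvBodyStepA d line))

def extract_findings_from_text_py (text : String) : List (List (String × String)) :=
  let lines := (PySem.Str.split? text "\n").getD []
  let st := lines.foldl pvStepA ([], none)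
  ((match st.2 with | none => st.1 | some d => st.1 ++ [d]).map PySem.Dict.items)

-- ===== PORT B =====
def pvSevsB : List String := ["Critical", "High", "Medium", "Low", "Informational"]

-- the `for s in …: if s in title_parts: severity = s; break` loop
def pvFirstSevB : List String → String → String
  | [], _ => "Medium"
  | s :: rest, tp => if PySem.Str.isIn s tp then s else pvFirstSevB rest tp

-- `groups[-1][1].append(ln)`
def pvPushLastB : List (String × List String) → String → List (String × List String)
  | [], _ => []
  | [(h, b)], ln => [(h, b ++ [ln])]
  | p :: rest, ln => p :: pvPushLastB rest ln

def pvGroupStepB (gs : List (String × List String)) (ln : String) : List (String × List String) :=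
  if PySem.Str.startswith ln "###" then gs ++ [(ln, [])] else pvPushLastB gs ln

-- body loop of _parse_group: state (description, severity, location)
def pvBodyStepB (st : String × String × String) (line : String) : String × String × String :=
  let low := PySem.Str.lower line
  if PySem.Str.isIn "description:" low then
    let parts := (PySem.Str.splitMax? line ":" 1).getD []
    if parts.length > 1 then (PySem.Str.strip (parts.getD 1 ""), st.2.1, st.2.2) else st
  else if PySem.Str.isIn "location:" low then
    let parts := (PySem.Str.splitMax? line ":" 1).getD []
    if parts.length > 1 then (st.1, st.2.1, PySem.Str.strip (parts.getD 1 "")) else st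
  else if PySem.Str.isIn "severity:" low then
    let parts := (PySem.Str.splitMax? line ":" 1).getD []
    if parts.length > 1 then
      let sev := PySem.Str.strip (parts.getD 1 "")
      if pvSevsB.contains sev then (st.1, sev, st.2.2) else st
    else st
  else if line ≠ "" then
    (if st.1 ≠ "" then st.1 ++ " " ++ line else line, st.2.1, st.2.2)
  else st

def pvParseGroupB (header : String) (body : List String) : PySem.Dict String String :=
  let title_parts := PySem.Str.strip (PySem.Str.stripChars header "#")
  let severity := pvFirstSevB pvSevsB title_parts
  let title := pvSevsB.foldl
    (fun t s => PySem.Str.replace (PySem.Str.replace t ("(" ++ s ++ ")") "") ("[" ++ s ++ "]") "") title_parts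
  let title := PySem.Str.strip title
  let r := body.foldl pvBodyStepB ("", severity, "")
  PySem.Dict.ofList [("title", title), ("description", r.1), ("severity", r.2.1), ("location", r.2.2)]

def extract_findings_from_text_py_alt (text : String) : List (List (String × String)) :=
  let lines := ((PySem.Str.split? text "\n").getD []).map PySem.Str.strip
  let groups := lines.foldl pvGroupStepB []
  groups.map (fun p => (pvParseGroupB p.1 p.2).items)

-- ===== PRECONDITION & SPEC =====
def Spec_extract_findings_from_text_py (text : String) (out : List (List (String × String))) : Prop := out = extract_findings_from_text_py_alt text
instance (text : String) (out : List (List (String × String))) : Decidable (Spec_extract_findings_from_text_py text out) := by unfold Spec_extract_findings_from_text_py; infer_instance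

-- ===== CLAIM (what is proved, stated in full; the proofs are below) =====
def Claim_equal_extract_findings_from_text_py : Prop := ∀ (text : String), Dom_extract_findings_from_text_py text → Spec_extract_findings_from_text_py text (extract_findings_from_text_py text)

-- ===== LEMMAS AND PROOFS =====

-- the shape A's current_finding always has
def pvMkD (t d s l : String) : PySem.Dict String String :=
  PySem.Dict.mk [("title", t), ("description", d), ("severity", s), ("location", l)]

def pvBparse (gs : List (String × List String)) : List (List (String × String)) :=
  gs.map (fun p => (pvParseGroupB p.1 p.2).items)

def pvFinish (st : List (PySem.Dict String String) × Option (PySem.Dict String String)) :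
    List (List (String × String)) :=
  ((match st.2 with | none => st.1 | some d => st.1 ++ [d]).map PySem.Dict.items)

theorem mkd_getD (t d s l : String) : (pvMkD t d s l).getD "description" "" = d := rfl
theorem mkd_contains (t d s l : String) : (pvMkD t d s l).contains "description" = true := rfl
theorem mkd_ins_d (t d s l v : String) : (pvMkD t d s l).insert "description" v = pvMkD t v s l := rfl
theorem mkd_ins_l (t d s l v : String) : (pvMkD t d s l).insert "location" v = pvMkD t d s v := rfl
theorem mkd_ins_s (t d s l v : String) : (pvMkD t d s l).insert "severity" v = pvMkD t d v l := rfl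

theorem pvBodyStepA_eq (t d s l line : String) :
    pvBodyStepA (pvMkD t d s l) line =
      pvMkD t (pvBodyStepB (d, s, l) line).1 (pvBodyStepB (d, s, l) line).2.1
        (pvBodyStepB (d, s, l) line).2.2 := by
  simp only [pvBodyStepA, pvBodyStepB, pvSevListA, pvSevsB, mkd_getD, mkd_contains, mkd_ins_d,
    mkd_ins_l, mkd_ins_s, Bool.and_true, decide_eq_true_eq]
  split_ifs <;> rfl
theorem ofl (t d s l : String) : PySem.Dict.ofList [("title", t), ("description", d), ("severity", s), ("location", l)] = pvMkD t d s l := rfl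

theorem pvHeaderDictA_eq (line : String) :
    pvHeaderDictA line =
      pvMkD (PySem.Str.strip (pvSevsB.foldl
              (fun t s => PySem.Str.replace (PySem.Str.replace t ("(" ++ s ++ ")") "") ("[" ++ s ++ "]") "")
              (PySem.Str.strip (PySem.Str.stripChars line "#"))))
            ""
            (pvFirstSevB pvSevsB (PySem.Str.strip (PySem.Str.stripChars line "#")))
            "" := by
  simp only [pvHeaderDictA, pvSevsB, pvSevListA, pvFirstSevB]
  rw [ofl]
theorem pvPushLastB_cons (p : String × List String) (L : List (String × List String)) (ln : String)
    (h : L ≠ []) : pvPushLastB (p :: L) ln = p :: pvPushLastB L ln := by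
  cases L with
  | nil => exact absurd rfl h
  | cons q qs => rfl

theorem pvPushLastB_append (gs ys : List (String × List String)) (ln : String) (hy : ys ≠ []) :
    pvPushLastB (gs ++ ys) ln = gs ++ pvPushLastB ys ln := by
  induction gs with
  | nil => rfl
  | cons p rest ih =>
    rw [List.cons_append, pvPushLastB_cons p (rest ++ ys) ln (by simp [hy]), ih, List.cons_append]

theorem pvPushLastB_ne_nil (ys : List (String × List String)) (ln : String) (hy : ys ≠ []) :
    pvPushLastB ys ln ≠ [] := by
  cases ys with
  | nil => exact absurd rfl hy
  | cons p rest =>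
    cases rest with
    | nil => simp [pvPushLastB]
    | cons q qs => simp [pvPushLastB_cons p (q :: qs) ln (by simp)]

theorem pvGroupStepB_ne_nil (ys : List (String × List String)) (ln : String) (hy : ys ≠ []) :
    pvGroupStepB ys ln ≠ [] := by
  unfold pvGroupStepB
  split_ifs
  · simp
  · exact pvPushLastB_ne_nil ys ln hy

theorem pvGroupFold_append (L : List String) :
    ∀ (gs ys : List (String × List String)), ys ≠ [] →
      L.foldl pvGroupStepB (gs ++ ys) = gs ++ L.foldl pvGroupStepB ys := by
  induction L with
  | nil => intro gs ys _; rfl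
  | cons x xs ih =>
    intro gs ys hy
    simp only [List.foldl_cons]
    have hstep : pvGroupStepB (gs ++ ys) x = gs ++ pvGroupStepB ys x := by
      unfold pvGroupStepB
      split_ifs
      · simp
      · exact pvPushLastB_append gs ys x hy
    rw [hstep, ih _ _ (pvGroupStepB_ne_nil ys x hy)]

theorem pvStartswith4 (line : String) (h3 : PySem.Str.startswith line "###" = false) :
    PySem.Str.startswith line "####" = false := by
  by_contra h4
  rw [Bool.not_eq_false] at h4
  simp only [PySem.Str.startswith_eq] at h3 h4
  have h4' := (PySem.Chars.startswith_iff _ _).mp h4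
  have : PySem.Chars.startswith line.toList "###".toList = true :=
    (PySem.Chars.startswith_iff _ _).mpr (List.IsPrefix.trans (by decide) h4')
  rw [h3] at this
  exact Bool.false_ne_true this

theorem pvBodyFoldA_eq (body : List String) :
    ∀ t d s l, body.foldl pvBodyStepA (pvMkD t d s l) =
      pvMkD t (body.foldl pvBodyStepB (d, s, l)).1 (body.foldl pvBodyStepB (d, s, l)).2.1
        (body.foldl pvBodyStepB (d, s, l)).2.2 := by
  induction body with
  | nil => intro t d s l; rfl
  | cons x xs ih =>
    intro t d s l
    rw [List.foldl_cons, List.foldl_cons, pvBodyStepA_eq, ih]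

theorem pvGroup_eq_A (h : String) (body : List String) :
    body.foldl pvBodyStepA (pvHeaderDictA h) = pvParseGroupB h body := by
  rw [pvHeaderDictA_eq, pvBodyFoldA_eq]
  simp only [pvParseGroupB]
  rw [ofl]

theorem pvMain (L : List String) :
    (∀ (fs : List (PySem.Dict String String)) (h : String) (body : List String),
        pvFinish (L.foldl pvStepA (fs, some (body.foldl pvBodyStepA (pvHeaderDictA h)))) =
          fs.map PySem.Dict.items ++
            pvBparse ((L.map PySem.Str.strip).foldl pvGroupStepB [(h, body)])) ∧
    (∀ (fs : List (PySem.Dict String String)),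
        pvFinish (L.foldl pvStepA (fs, none)) =
          fs.map PySem.Dict.items ++
            pvBparse ((L.map PySem.Str.strip).foldl pvGroupStepB [])) := by
  induction L with
  | nil =>
    constructor
    · intro fs h body
      simp only [List.foldl_nil, List.map_nil, pvFinish, pvBparse, List.map_append,
        List.map_cons, pvGroup_eq_A]
    · intro fs
      simp [pvFinish, pvBparse]
  | cons x xs ih =>
    obtain ⟨hP, hQ⟩ := ih
    constructor
    · intro fs h body
      simp only [List.foldl_cons, List.map_cons]
      by_cases h3 : PySem.Str.startswith (PySem.Str.strip x) "###" = true
      · have h3' : PySem.Chars.startswith (PySem.Chars.strip x.toList) ['#','#','#'] = true := by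
          simpa using h3
        have hstepA : pvStepA (fs, some (body.foldl pvBodyStepA (pvHeaderDictA h))) x =
            (fs ++ [body.foldl pvBodyStepA (pvHeaderDictA h)], some (pvHeaderDictA (PySem.Str.strip x))) := by
          simp [pvStepA, h3']
        have hstepB : pvGroupStepB [(h, body)] (PySem.Str.strip x) =
            [(h, body)] ++ [((PySem.Str.strip x), [])] := by
          simp [pvGroupStepB, h3']
        rw [hstepA, hstepB, pvGroupFold_append _ _ _ (by simp)]
        have h' := hP (fs ++ [body.foldl pvBodyStepA (pvHeaderDictA h)]) (PySem.Str.strip x) []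
        simp only [List.foldl_nil] at h'
        rw [h']
        simp [pvBparse, pvGroup_eq_A]
      · rw [Bool.not_eq_true] at h3
        have h4 := pvStartswith4 _ h3
        have h3' : PySem.Chars.startswith (PySem.Chars.strip x.toList) ['#','#','#'] = false := by
          simpa using h3
        have h4' : PySem.Chars.startswith (PySem.Chars.strip x.toList) ['#','#','#','#'] = false := by
          simpa using h4
        have hstepA : pvStepA (fs, some (body.foldl pvBodyStepA (pvHeaderDictA h))) x =
            (fs, some ((body ++ [PySem.Str.strip x]).foldl pvBodyStepA (pvHeaderDictA h))) := by
          simp [pvStepA, h3', h4', List.foldl_append]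
        have hstepB : pvGroupStepB [(h, body)] (PySem.Str.strip x) = [(h, body ++ [PySem.Str.strip x])] := by
          simp [pvGroupStepB, h3', pvPushLastB]
        rw [hstepA, hstepB, hP fs h (body ++ [PySem.Str.strip x])]
    · intro fs
      simp only [List.foldl_cons, List.map_cons]
      by_cases h3 : PySem.Str.startswith (PySem.Str.strip x) "###" = true
      · have h3' : PySem.Chars.startswith (PySem.Chars.strip x.toList) ['#','#','#'] = true := by
          simpa using h3
        have hstepA : pvStepA (fs, none) x = (fs, some (pvHeaderDictA (PySem.Str.strip x))) := by
          simp [pvStepA, h3']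
        have hstepB : pvGroupStepB [] (PySem.Str.strip x) = [((PySem.Str.strip x), [])] := by
          simp [pvGroupStepB, h3']
        rw [hstepA, hstepB]
        have h' := hP fs (PySem.Str.strip x) []
        simp only [List.foldl_nil] at h'
        exact h'
      · rw [Bool.not_eq_true] at h3
        have h4 := pvStartswith4 _ h3
        have h3' : PySem.Chars.startswith (PySem.Chars.strip x.toList) ['#','#','#'] = false := by
          simpa using h3
        have h4' : PySem.Chars.startswith (PySem.Chars.strip x.toList) ['#','#','#','#'] = false := by
          simpa using h4
        have hstepA : pvStepA (fs, none) x = (fs, none) := by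
          simp [pvStepA, h3', h4']
        have hstepB : pvGroupStepB [] (PySem.Str.strip x) = [] := by
          simp [pvGroupStepB, h3', pvPushLastB]
        rw [hstepA, hstepB, hQ fs]

-- ===== VERDICT (by name: the statement is the Claim_ definition above) =====
theorem extract_findings_from_text_py_spec : Claim_equal_extract_findings_from_text_py := by
  intro text _
  unfold Spec_extract_findings_from_text_py
  unfold extract_findings_from_text_py extract_findings_from_text_py_alt
  have h' := (pvMain ((PySem.Str.split? text "\n").getD [])).2 []
  simp only [pvFinish, pvBparse, List.map_nil, List.nil_append] at h'
  exact h'
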